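-- pv_equiv track=rewrite | github.com/mipt-ltc/mipt-ltc.github.io | assets/addNewNames.py | getStandardizeAliasesStrOrNull
-- ===== SOURCE A (Python) =====
-- def addInSetName(name, namesSet, DBtype):
--     if name.strip() == '':
--         return
--     if DBtype == 'lecturers':
--         namesSet.add(name.strip().capitalize())
--     namesSet.add(name.strip().lower())
--
-- def getStandardizeAliasesStrOrNull(aliasesStr, DBtype):
--     aliases = aliasesStr.split('|')
--     namesSet = set()
--     for name in aliases:
--         addInSetName(name, namesSet, DBtype)
--     if len(namesSet) == 0:
--         return None
--     standardizedStr = '|'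
--     for name in sorted(namesSet):
--         standardizedStr += name + '|'
--     return standardizedStr
-- ===== SOURCE B (Python) =====
-- def _insert(lst, x):
--     # ordered insertion keeping lst strictly increasing (skip if already present)
--     i = 0
--     while i < len(lst) and lst[i] < x:
--         i += 1
--     if i == len(lst) or lst[i] != x:
--         lst.insert(i, x)
--
-- def getStandardizeAliasesStrOrNull(aliasesStr, DBtype):
--     sortedNames = []
--     for raw in aliasesStr.split('|'):
--         s = raw.strip()
--         if s == '':
--             continue
--         if DBtype == 'lecturers':
--             _insert(sortedNames, s.capitalize())
--         _insert(sortedNames, s.lower())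
--     if not sortedNames:
--         return None
--     return '|' + '|'.join(sortedNames) + '|'
-- ===== Notes on version B (the rewrite author's own statement) =====
-- stated objective: alternative
-- what changed: Instead of accumulating a set and sorting it afterwards, B maintains a sorted duplicate-free list by ordered insertion (insertion sort with dedup built into the insert) while scanning the aliases once, then joins it; no set and no sort call.
import Mathlib
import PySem

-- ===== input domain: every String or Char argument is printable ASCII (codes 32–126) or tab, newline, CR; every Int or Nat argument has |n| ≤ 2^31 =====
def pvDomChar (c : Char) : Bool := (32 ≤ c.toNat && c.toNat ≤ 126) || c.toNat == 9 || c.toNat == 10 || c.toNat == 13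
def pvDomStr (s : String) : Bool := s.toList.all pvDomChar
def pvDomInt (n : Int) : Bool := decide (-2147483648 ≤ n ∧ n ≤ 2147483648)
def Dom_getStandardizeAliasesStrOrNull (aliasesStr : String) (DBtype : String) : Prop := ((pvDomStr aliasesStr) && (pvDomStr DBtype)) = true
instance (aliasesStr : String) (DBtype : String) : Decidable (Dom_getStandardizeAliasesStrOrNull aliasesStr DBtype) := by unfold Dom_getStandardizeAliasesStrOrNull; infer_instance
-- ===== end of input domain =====

-- B maintains a sorted duplicate-free list by ordered insertion while scanning the aliases
-- once (no set, no sort call) and joins it; the return values are proved equal on all inputs.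

-- s.capitalize(): first char upper-cased, rest lower-cased — exact on the ASCII domain (shared helper)
def pvCapitalize (s : String) : String :=
  match s.toList with
  | [] => ""
  | c :: cs => String.ofList (PySem.Chars.upperChar c :: PySem.Chars.lower cs)

-- ===== PORT A =====
def pvAddInSetName (name : String) (namesSet : PySem.Set String) (DBtype : String) : PySem.Set String :=
  if PySem.Str.strip name = "" then namesSet
  else
    let s1 := if DBtype = "lecturers"
      then PySem.Set.add namesSet (pvCapitalize (PySem.Str.strip name))
      else namesSet
    PySem.Set.add s1 (PySem.Str.lower (PySem.Str.strip name))

-- s.split('|'): the separator "|" is a nonempty literal, so split? is always `some`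
def getStandardizeAliasesStrOrNull (aliasesStr : String) (DBtype : String) : Option String :=
  let aliases := (PySem.Str.split? aliasesStr "|").getD []
  let namesSet := aliases.foldl (fun st name => pvAddInSetName name st DBtype) PySem.Set.empty
  if PySem.Set.len namesSet = 0 then none
  else some ((PySem.List.sorted namesSet (fun x => x) false).foldl (fun acc n => acc ++ (n ++ "|")) "|")

-- ===== PORT B =====
-- Source B's _insert: walk past the elements < x, then skip x if present, else insert it there
def pvInsort : List String → String → List String
  | [], x => [x]
  | y :: ys, x => if y < x then y :: pvInsort ys x else if y = x then y :: ys else x :: y :: ys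

def getStandardizeAliasesStrOrNull_alt (aliasesStr : String) (DBtype : String) : Option String :=
  let sortedNames := ((PySem.Str.split? aliasesStr "|").getD []).foldl (fun acc raw =>
    let s := PySem.Str.strip raw
    if s = "" then acc
    else pvInsort (if DBtype = "lecturers" then pvInsort acc (pvCapitalize s) else acc)
                  (PySem.Str.lower s)) []
  match sortedNames with
  | [] => none
  | _ => some ("|" ++ PySem.Str.join "|" sortedNames ++ "|")

-- ===== PRECONDITION & SPEC =====
def Spec_getStandardizeAliasesStrOrNull (aliasesStr : String) (DBtype : String) (out : Option String) : Prop := out = getStandardizeAliasesStrOrNull_alt aliasesStr DBtype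
instance (aliasesStr : String) (DBtype : String) (out : Option String) : Decidable (Spec_getStandardizeAliasesStrOrNull aliasesStr DBtype out) := by unfold Spec_getStandardizeAliasesStrOrNull; infer_instance

-- ===== CLAIM (what is proved, stated in full; the proofs are below) =====
def Claim_equal_getStandardizeAliasesStrOrNull : Prop := ∀ (aliasesStr : String) (DBtype : String), Dom_getStandardizeAliasesStrOrNull aliasesStr DBtype → Spec_getStandardizeAliasesStrOrNull aliasesStr DBtype (getStandardizeAliasesStrOrNull aliasesStr DBtype)

-- ===== LEMMAS AND PROOFS =====

-- the per-alias contribution both programs produce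
def pvNames (DBtype : String) (raw : String) : List String :=
  let s := PySem.Str.strip raw
  if s = "" then []
  else (if DBtype = "lecturers" then [pvCapitalize s] else []) ++ [PySem.Str.lower s]

theorem pvAddInSetName_eq_update (name : String) (st : PySem.Set String) (DBtype : String) :
    pvAddInSetName name st DBtype = PySem.Set.update st (pvNames DBtype name) := by
  unfold pvAddInSetName pvNames PySem.Set.update
  by_cases h1 : PySem.Str.strip name = "" <;> by_cases h2 : DBtype = "lecturers" <;>
    simp [h1, h2, List.foldl]

theorem pvAfold_eq_ofList (DBtype : String) (aliases : List String) (st : PySem.Set String) :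
    aliases.foldl (fun st name => pvAddInSetName name st DBtype) st
    = PySem.Set.update st (aliases.flatMap (pvNames DBtype)) := by
  induction aliases generalizing st with
  | nil => simp [PySem.Set.update]
  | cons a t ih =>
    rw [List.foldl_cons, ih, pvAddInSetName_eq_update, List.flatMap_cons]
    simp [PySem.Set.update, List.foldl_append]

theorem pvMem_insort (l : List String) (x z : String) :
    z ∈ pvInsort l x ↔ z = x ∨ z ∈ l := by
  induction l with
  | nil => simp [pvInsort]
  | cons y ys ih =>
    simp only [pvInsort]
    split_ifs with h1 h2
    · rw [List.mem_cons, ih, List.mem_cons]; tauto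
    · subst h2; simp
    · simp

theorem pvPairwise_insort (l : List String) (x : String) (h : l.Pairwise (· < ·)) :
    (pvInsort l x).Pairwise (· < ·) := by
  induction l with
  | nil => simp [pvInsort]
  | cons y ys ih =>
    rcases List.pairwise_cons.mp h with ⟨hy, hys⟩
    simp only [pvInsort]
    split_ifs with h1 h2
    · refine List.pairwise_cons.mpr ⟨?_, ih hys⟩
      intro z hz
      rcases (pvMem_insort ys x z).mp hz with rfl | hz'
      · exact h1
      · exact hy z hz'
    · exact h
    · have hxy : x < y := lt_of_le_of_ne (le_of_not_gt h1) (fun e => h2 e.symm)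
      refine List.pairwise_cons.mpr ⟨?_, h⟩
      intro z hz
      rcases List.mem_cons.mp hz with rfl | hz'
      · exact hxy
      · exact lt_trans hxy (hy z hz')

theorem pvFoldl_insort_mem (L : List String) (acc : List String) (z : String) :
    z ∈ L.foldl pvInsort acc ↔ z ∈ acc ∨ z ∈ L := by
  induction L generalizing acc with
  | nil => simp
  | cons a t ih => rw [List.foldl_cons, ih, pvMem_insort]; simp; tauto

theorem pvFoldl_insort_pairwise (L : List String) (acc : List String)
    (h : acc.Pairwise (· < ·)) : (L.foldl pvInsort acc).Pairwise (· < ·) := by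
  induction L generalizing acc with
  | nil => exact h
  | cons a t ih => exact ih _ (pvPairwise_insort acc a h)

-- B's per-alias step is folding pvInsort over that alias's contributions
theorem pvBstep_eq (DBtype raw : String) (acc : List String) :
    (let s := PySem.Str.strip raw
     if s = "" then acc
     else pvInsort (if DBtype = "lecturers" then pvInsort acc (pvCapitalize s) else acc)
                   (PySem.Str.lower s))
    = (pvNames DBtype raw).foldl pvInsort acc := by
  unfold pvNames
  by_cases h1 : PySem.Str.strip raw = "" <;> by_cases h2 : DBtype = "lecturers" <;>
    simp [h1, h2, List.foldl]

theorem pvBfold_eq (DBtype : String) (aliases : List String) (acc : List String) :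
    aliases.foldl (fun acc raw =>
      let s := PySem.Str.strip raw
      if s = "" then acc
      else pvInsort (if DBtype = "lecturers" then pvInsort acc (pvCapitalize s) else acc)
                    (PySem.Str.lower s)) acc
    = (aliases.flatMap (pvNames DBtype)).foldl pvInsort acc := by
  induction aliases generalizing acc with
  | nil => simp
  | cons a t ih =>
    rw [List.foldl_cons, List.flatMap_cons, List.foldl_append, pvBstep_eq, ih]

-- the heart: sorted(set(L)) is exactly the list built by ordered dedup insertion over L
theorem pvSorted_ofList_eq_foldl_insort (L : List String) :
    PySem.List.sorted (PySem.Set.ofList L) (fun x => x) false = L.foldl pvInsort [] := by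
  have hpw : (L.foldl pvInsort []).Pairwise (· < ·) :=
    pvFoldl_insort_pairwise L [] (List.Pairwise.nil)
  apply PySem.List.sorted_eq_of_perm_of_pairwise_lt
  · have hnd1 : (L.foldl pvInsort []).Nodup := hpw.imp ne_of_lt
    have hnd2 : (PySem.Set.ofList L).Nodup := PySem.Set.nodup_ofList L
    rw [List.perm_ext_iff_of_nodup hnd1 hnd2]
    intro z
    rw [pvFoldl_insort_mem, PySem.Set.mem_ofList]
    simp
  · exact hpw

-- A's string accumulation equals B's wrap-and-join
theorem pvFoldl_join (parts : List String) (n0 : String) (pre : String) :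
    (n0 :: parts).foldl (fun acc n => acc ++ (n ++ "|")) pre
    = pre ++ PySem.Str.join "|" (n0 :: parts) ++ "|" := by
  induction parts generalizing n0 pre with
  | nil =>
    simp only [List.foldl_cons, List.foldl_nil]
    rw [← String.toList_inj]
    simp [PySem.Str.join, PySem.Chars.join_singleton]
  | cons b t ih =>
    rw [List.foldl_cons, ih b (pre ++ (n0 ++ "|"))]
    rw [← String.toList_inj]
    simp [PySem.Str.join, PySem.Chars.join_cons_cons]

theorem pvOfList_len_zero_iff (L : List String) :
    PySem.Set.len (PySem.Set.ofList L) = 0 ↔ L = [] := by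
  cases L with
  | nil => simp [PySem.Set.ofList, PySem.Set.len]
  | cons a t =>
    constructor
    · intro hlen
      exfalso
      have hmem : a ∈ PySem.Set.ofList (a :: t) := (PySem.Set.mem_ofList ..).mpr List.mem_cons_self
      cases hof : PySem.Set.ofList (a :: t) with
      | nil => rw [hof] at hmem; exact List.not_mem_nil hmem
      | cons b s => rw [hof] at hlen; simp [PySem.Set.len] at hlen; omega
    · intro h; exact absurd h (List.cons_ne_nil a t)

theorem pvFoldl_insort_nil_iff (L : List String) :
    L.foldl pvInsort [] = [] ↔ L = [] := by
  constructor
  · intro h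
    rw [List.eq_nil_iff_forall_not_mem]
    intro z hz
    have := (pvFoldl_insort_mem L [] z).mpr (Or.inr hz)
    rw [h] at this
    exact List.not_mem_nil this
  · intro h; subst h; rfl

theorem pvUpdate_empty (L : List String) :
    PySem.Set.update PySem.Set.empty L = PySem.Set.ofList L := by
  rw [PySem.Set.ofList_eq_foldl]; rfl

-- ===== VERDICT (by name: the statement is the Claim_ definition above) =====
theorem getStandardizeAliasesStrOrNull_spec : Claim_equal_getStandardizeAliasesStrOrNull := by
  intro aliasesStr DBtype _
  unfold Spec_getStandardizeAliasesStrOrNull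
  simp only [getStandardizeAliasesStrOrNull, getStandardizeAliasesStrOrNull_alt]
  rw [pvAfold_eq_ofList, pvUpdate_empty, pvBfold_eq]
  generalize List.flatMap (pvNames DBtype) ((PySem.Str.split? aliasesStr "|").getD []) = L
  by_cases hempty : L = []
  · subst hempty
    simp [PySem.Set.ofList, PySem.Set.len]
  · rw [if_neg (fun h => hempty ((pvOfList_len_zero_iff L).mp h))]
    cases hM : L.foldl pvInsort [] with
    | nil => exact absurd ((pvFoldl_insort_nil_iff L).mp hM) hempty
    | cons n0 rest =>
      rw [pvSorted_ofList_eq_foldl_insort L, hM, pvFoldl_join]
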